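-- pv_equiv track=rewrite | github.com/qumulator/qumulator-sdk | src/qumulator/backends/qiskit_backend.py | _to_qiskit_bitstring
-- ===== SOURCE A (Python) =====
-- from typing import Any, Dict, List, Optional, Union
--
-- def _to_qiskit_bitstring(
--     api_bs: str, measure_map: Dict[int, int], n_qubits: int
-- ) -> str:
--     """
--     Convert an MSB-first bitstring from the Qumulator API to a Qiskit
--     LSB-first classical register string.
--
--     If no explicit measure_map is present (full measurement), just reverse
--     the bitstring.
--     """
--     if not measure_map:
--         return api_bs[::-1]
--
--     n_clbits = max(measure_map.values()) + 1 if measure_map else n_qubits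
--     clbits = ["0"] * n_clbits
--     for q_idx, c_idx in measure_map.items():
--         # api_bs is MSB-first: qubit 0 is index 0.
--         if q_idx < len(api_bs):
--             clbits[c_idx] = api_bs[q_idx]
--     # Qiskit convention: clbit 0 is rightmost character.
--     return "".join(reversed(clbits))
-- ===== SOURCE B (Python) =====
-- def _to_qiskit_bitstring(api_bs, measure_map, n_qubits):
--     if not measure_map:
--         return api_bs[::-1]
--     n_clbits = max(measure_map.values()) + 1
--     # last-write-wins table clbit -> qubit, over in-range qubits only
--     entries = {c: q for q, c in measure_map.items() if q < len(api_bs)}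
--     # sort the occupied clbit positions, highest first, and emit zero-runs
--     # between them: the output never materialises a clbit array.
--     parts = []
--     pos = n_clbits
--     for c in sorted(entries, reverse=True):
--         parts.append('0' * (pos - 1 - c))
--         parts.append(api_bs[entries[c]])
--         pos = c
--     parts.append('0' * pos)
--     return ''.join(parts)
-- ===== Notes on version B (the rewrite author's own statement) =====
-- stated objective: alternative
-- what changed: A scatters each measured bit into a preallocated clbit array and reverses it; B never builds that array: it collects the in-range entries into a last-write-wins clbit->qubit table, sorts the occupied clbit positions descending, and emits the string as a sequence of zero-runs and measured characters between consecutive occupied positions (sort-then-scan with run-length gap fill). …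
-- outside the precondition, e.g. on _to_qiskit_bitstring('10', {0: 2, 1: -1}, 2): A returns '000', B returns '1000'
import Mathlib
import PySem

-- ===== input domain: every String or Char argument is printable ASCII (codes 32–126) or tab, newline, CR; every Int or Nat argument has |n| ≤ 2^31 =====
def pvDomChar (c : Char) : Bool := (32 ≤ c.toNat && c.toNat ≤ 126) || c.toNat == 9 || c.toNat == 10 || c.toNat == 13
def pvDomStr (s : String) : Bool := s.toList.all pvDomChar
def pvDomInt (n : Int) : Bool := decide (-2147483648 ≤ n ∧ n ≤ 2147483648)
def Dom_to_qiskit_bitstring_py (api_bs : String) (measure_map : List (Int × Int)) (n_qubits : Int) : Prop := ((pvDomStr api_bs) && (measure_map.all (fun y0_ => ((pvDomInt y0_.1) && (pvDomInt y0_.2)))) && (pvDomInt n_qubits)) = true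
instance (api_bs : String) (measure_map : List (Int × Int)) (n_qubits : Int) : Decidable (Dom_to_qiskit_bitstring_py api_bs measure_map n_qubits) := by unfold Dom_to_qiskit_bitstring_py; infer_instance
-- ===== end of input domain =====

-- B replaces A's scatter-into-a-clbit-array-then-reverse by a sort-then-scan: it sorts the occupied
-- clbit positions descending and emits the output as zero-runs between them (objective: alternative).

-- ===== PORT A =====
def to_qiskit_bitstring_py (api_bs : String) (measure_map : List (Int × Int)) (n_qubits : Int) : String :=
  if measure_map = [] then String.ofList api_bs.toList.reverse
  else
    let bs := api_bs.toList
    let n_clbits : Int := (PySem.List.max? (measure_map.map Prod.snd) (fun x => x)).getD 0 + 1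
    let clbits0 : List Char := List.replicate n_clbits.toNat '0'
    let clbits := measure_map.foldl (fun cl p =>
      if p.1 < (bs.length : Int)
      then PySem.List.pySetD cl p.2 ((PySem.List.pyGet? bs p.1).getD '0')
      else cl) clbits0
    String.ofList clbits.reverse

-- ===== PORT B =====
def to_qiskit_bitstring_py_alt (api_bs : String) (measure_map : List (Int × Int)) (n_qubits : Int) : String :=
  if measure_map = [] then String.ofList api_bs.toList.reverse
  else
    let bs := api_bs.toList
    let n_clbits : Int := (PySem.List.max? (measure_map.map Prod.snd) (fun x => x)).getD 0 + 1
    -- {c: q for q, c in measure_map.items() if q < len(api_bs)}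
    let entries : PySem.Dict Int Int :=
      (measure_map.filter (fun p => p.1 < (bs.length : Int))).foldl
        (fun d p => d.insert p.2 p.1) PySem.Dict.empty
    -- for c in sorted(entries, reverse=True): emit '0'*(pos-1-c) then api_bs[entries[c]]
    let st := (PySem.List.sorted entries.keys (fun c => c) true).foldl
      (fun (st : List Char × Int) c =>
        (st.1 ++ List.replicate (st.2 - 1 - c).toNat '0'
              ++ [(PySem.List.pyGet? bs ((entries.get? c).getD 0)).getD '0'], c))
      ([], n_clbits)
    String.ofList (st.1 ++ List.replicate st.2.toNat '0')

-- ===== PRECONDITION & SPEC =====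
-- Pre_ keeps only measure maps with nonnegative clbit indices — the natural domain of a measure map; a
-- negative clbit index makes A's list write count from the end of the register (or raise IndexError), a
-- behaviour B does not reproduce — and it also excludes qubit indices below -len(api_bs), on which both
-- A and B raise IndexError.
def Pre_to_qiskit_bitstring_py (api_bs : String) (measure_map : List (Int × Int)) (n_qubits : Int) : Prop :=
  ∀ p ∈ measure_map, 0 ≤ p.2 ∧ (p.1 < (api_bs.toList.length : Int) → -(api_bs.toList.length : Int) ≤ p.1)
instance (api_bs : String) (measure_map : List (Int × Int)) (n_qubits : Int) : Decidable (Pre_to_qiskit_bitstring_py api_bs measure_map n_qubits) := by unfold Pre_to_qiskit_bitstring_py; infer_instance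
def pvWitness_to_qiskit_bitstring_py : String × (List (Int × Int)) × Int := ("01", [(0, 1), (1, 0)], 2)

def Spec_to_qiskit_bitstring_py (api_bs : String) (measure_map : List (Int × Int)) (n_qubits : Int) (out : String) : Prop := out = to_qiskit_bitstring_py_alt api_bs measure_map n_qubits
instance (api_bs : String) (measure_map : List (Int × Int)) (n_qubits : Int) (out : String) : Decidable (Spec_to_qiskit_bitstring_py api_bs measure_map n_qubits out) := by unfold Spec_to_qiskit_bitstring_py; infer_instance

-- ===== CLAIM =====
def Claim_equal_to_qiskit_bitstring_py : Prop := ∀ (api_bs : String) (measure_map : List (Int × Int)) (n_qubits : Int), Dom_to_qiskit_bitstring_py api_bs measure_map n_qubits → Pre_to_qiskit_bitstring_py api_bs measure_map n_qubits → Spec_to_qiskit_bitstring_py api_bs measure_map n_qubits (to_qiskit_bitstring_py api_bs measure_map n_qubits)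

-- ===== LEMMAS AND PROOFS =====

-- A's scatter loop keeps the register length.
lemma scatter_length (bs : List Char) (mm : List (Int × Int)) (cl : List Char) :
    (mm.foldl (fun cl p =>
      if p.1 < (bs.length : Int)
      then PySem.List.pySetD cl p.2 ((PySem.List.pyGet? bs p.1).getD '0')
      else cl) cl).length = cl.length := by
  induction mm generalizing cl with
  | nil => rfl
  | cons p mm ih =>
      simp only [List.foldl_cons]
      split
      · rw [ih, PySem.List.length_pySetD]
      · exact ih cl

-- Pointwise: A's scatter loop keeps cell j equal to what the inverse table prescribes for it,
-- provided the starting register and starting table already agree in that sense.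
lemma scatter_get (bs : List Char) (mm : List (Int × Int)) (n : Nat)
    (hc : ∀ p ∈ mm, 0 ≤ p.2 ∧ p.2 < (n : Int))
    (cl : List Char) (hlen : cl.length = n) (d : PySem.Dict Int Int)
    (hinv : ∀ (j : Nat) (hj : j < n),
      cl[j]'(by omega) = (match d.get? (j : Int) with
        | some q => (PySem.List.pyGet? bs q).getD '0'
        | none => '0')) (j : Nat) (hj : j < n) :
    ∀ (h : _),
    (mm.foldl (fun cl p =>
      if p.1 < (bs.length : Int)
      then PySem.List.pySetD cl p.2 ((PySem.List.pyGet? bs p.1).getD '0')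
      else cl) cl)[j]'h =
    (match (mm.foldl (fun d (p : Int × Int) =>
        if p.1 < (bs.length : Int) then d.insert p.2 p.1 else d) d).get? (j : Int) with
      | some q => (PySem.List.pyGet? bs q).getD '0'
      | none => '0') := by
  induction mm generalizing cl d with
  | nil => intro h; exact hinv j hj
  | cons p mm ih =>
      intro h
      simp only [List.foldl_cons]
      by_cases hq : p.1 < (bs.length : Int)
      · simp only [if_pos hq]
        have hc0 := hc p (by simp)
        have hset := PySem.List.pySetD_of_nonneg cl ((PySem.List.pyGet? bs p.1).getD '0') hc0.1
        refine ih (fun q hmem => hc q (by simp [hmem]))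
          (PySem.List.pySetD cl p.2 ((PySem.List.pyGet? bs p.1).getD '0'))
          (by rw [hset]; simpa using hlen)
          (d.insert p.2 p.1) ?_ _
        intro i hi
        simp only [hset]
        rw [List.getElem_set, PySem.Dict.get?_insert]
        by_cases hie : (i : Int) = p.2
        · have : p.2.toNat = i := by omega
          simp [this, hie]
        · have : p.2.toNat ≠ i := by omega
          simp only [if_neg this, if_neg hie]
          exact hinv i hi
      · simp only [if_neg hq]
        exact ih (fun q hmem => hc q (by simp [hmem])) cl hlen d hinv _

-- A list whose every element maps to '0' maps to a replicate of '0'.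
lemma map_eq_replicate_zero (g : Nat → Char) (l : List Nat) (h : ∀ x ∈ l, g x = '0') :
    l.map g = List.replicate l.length '0' := by
  induction l with
  | nil => rfl
  | cons x l ih =>
      simp only [List.map_cons, List.length_cons, List.replicate_succ]
      rw [h x (by simp), ih (fun y hy => h y (by simp [hy]))]

-- Membership in the keys of B's table-building fold.
lemma mem_keys_fold (l : List (Int × Int)) (d : PySem.Dict Int Int) (k : Int)
    (h : k ∈ (l.foldl (fun d (p : Int × Int) => d.insert p.2 p.1) d).keys) :
    k ∈ d.keys ∨ ∃ p ∈ l, p.2 = k := by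
  induction l generalizing d with
  | nil => exact Or.inl h
  | cons p l ih =>
      rcases ih (d.insert p.2 p.1) h with h' | h'
      · rcases (PySem.Dict.mem_keys_insert _ _ _ _).mp h' with h'' | h''
        · exact Or.inr ⟨p, by simp, h''.symm⟩
        · exact Or.inl h''
      · exact Or.inr (by obtain ⟨q, hq, hq2⟩ := h'; exact ⟨q, by simp [hq], hq2⟩)

-- B's sorted gather with zero-run gap fill produces exactly the reversed character table.
lemma gather_runs (bs : List Char) (ent : PySem.Dict Int Int) (g : Nat → Char)
    (hg : ∀ c : Nat, g c = (match ent.get? (c : Int) with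
        | some q => (PySem.List.pyGet? bs q).getD '0'
        | none => '0'))
    (ks : List Int) (pos : Int) (acc : List Char)
    (hsort : ks.Pairwise (· > ·))
    (hbnd : ∀ k ∈ ks, 0 ≤ k ∧ k < pos)
    (hpos : 0 ≤ pos)
    (hnone : ∀ j : Nat, (j : Int) < pos → (j : Int) ∉ ks → ent.get? (j : Int) = none)
    (hsome : ∀ k ∈ ks, (ent.get? k).isSome) :
    (let st := ks.foldl (fun (st : List Char × Int) c =>
        (st.1 ++ List.replicate (st.2 - 1 - c).toNat '0'
              ++ [(PySem.List.pyGet? bs ((ent.get? c).getD 0)).getD '0'], c)) (acc, pos)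
     st.1 ++ List.replicate st.2.toNat '0')
    = acc ++ (List.range pos.toNat).reverse.map g := by
  induction ks generalizing pos acc with
  | nil =>
      simp only [List.foldl_nil]
      rw [map_eq_replicate_zero g _ (by
        intro x hx
        simp only [List.mem_reverse, List.mem_range] at hx
        rw [hg x, hnone x (by omega) (by simp)])]
      simp
  | cons k tl ih =>
      simp only [List.foldl_cons]
      have hk := hbnd k (by simp)
      have htl_lt : ∀ x ∈ tl, x < k := fun x hx => (List.pairwise_cons.mp hsort).1 x hx
      rw [ih _ _ (List.pairwise_cons.mp hsort).2
        (fun x hx => ⟨(hbnd x (by simp [hx])).1, htl_lt x hx⟩) hk.1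
        (fun j hj hjn => hnone j (by omega) (by
          simp only [List.mem_cons, not_or]
          exact ⟨by omega, hjn⟩))
        (fun x hx => hsome x (by simp [hx]))]
      -- now: acc ++ replicate (pos-1-k).toNat '0' ++ [charB k] ++ (range k.toNat).reverse.map g
      --    = acc ++ (range pos.toNat).reverse.map g
      have ha : pos.toNat = (k.toNat + 1) + (pos - 1 - k).toNat := by omega
      rw [ha, List.range_add, List.reverse_append, List.map_append]
      have hz0 : ∀ x ∈ (List.map (fun x => k.toNat + 1 + x) (List.range (pos - 1 - k).toNat)).reverse,
          g x = '0' := by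
        intro x hx
        simp only [List.mem_reverse, List.mem_map, List.mem_range] at hx
        obtain ⟨y, hy, rfl⟩ := hx
        rw [hg, hnone _ (by omega) (by
          intro hmem
          rcases List.mem_cons.mp hmem with h' | h'
          · omega
          · have := htl_lt _ h'; omega)]
      have hz : (List.map (fun x => k.toNat + 1 + x) (List.range (pos - 1 - k).toNat)).reverse.map g
          = List.replicate (pos - 1 - k).toNat '0' := by
        rw [map_eq_replicate_zero g _ hz0]
        simp
      have hhead : (List.range (k.toNat + 1)).reverse = k.toNat :: (List.range k.toNat).reverse := by
        rw [List.range_succ, List.reverse_append]; rfl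
      rw [hz, hhead]
      simp only [List.map_cons]
      have hkk : ((k.toNat : Int)) = k := by omega
      have hsk := hsome k (by simp)
      have hgk : g k.toNat = (PySem.List.pyGet? bs ((ent.get? k).getD 0)).getD '0' := by
        rw [hg, hkk]
        cases h : ent.get? k with
        | none => rw [h] at hsk; simp at hsk
        | some q => simp
      rw [hgk]
      simp

theorem to_qiskit_bitstring_py_spec : Claim_equal_to_qiskit_bitstring_py := by
  intro api_bs mm nq _hdom hpre
  unfold Spec_to_qiskit_bitstring_py
  unfold to_qiskit_bitstring_py to_qiskit_bitstring_py_alt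
  by_cases hmm : mm = []
  · simp [hmm]
  · simp only [if_neg hmm]
    set bs := api_bs.toList with hbs
    obtain ⟨m, hm⟩ : ∃ m, PySem.List.max? (mm.map Prod.snd) (fun x => x) = some m := by
      cases hmax : PySem.List.max? (mm.map Prod.snd) (fun x => x) with
      | none => exact absurd (by simpa using (PySem.List.max?_eq_none_iff _ _).mp hmax) hmm
      | some m => exact ⟨m, rfl⟩
    have hmax : ∀ p ∈ mm, p.2 ≤ m := by
      intro p hp
      exact PySem.List.max?_isMax hm p.2 (List.mem_map_of_mem hp)
    have hm0 : 0 ≤ m := by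
      obtain ⟨p, hp⟩ := List.exists_mem_of_ne_nil mm hmm
      exact le_trans (hpre p hp).1 (hmax p hp)
    simp only [hm, Option.getD_some]
    set n : Nat := (m + 1).toNat with hn
    have hc : ∀ p ∈ mm, 0 ≤ p.2 ∧ p.2 < (n : Int) := by
      intro p hp
      exact ⟨(hpre p hp).1, by have := hmax p hp; omega⟩
    set flt := mm.filter (fun p => p.1 < (bs.length : Int)) with hflt
    set ent := flt.foldl (fun d (p : Int × Int) => d.insert p.2 p.1) PySem.Dict.empty with hent
    set g : Nat → Char := fun j => (match ent.get? (j : Int) with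
      | some q => (PySem.List.pyGet? bs q).getD '0'
      | none => '0') with hgdef
    -- A's fold over mm with the range guard is the fold over the filtered list
    have hAfold : mm.foldl (fun d (p : Int × Int) =>
        if p.1 < (bs.length : Int) then d.insert p.2 p.1 else d) PySem.Dict.empty = ent := by
      rw [hent, hflt, List.foldl_filter]
      simp
    -- keys facts
    have hkeysnodup : ent.keys.Nodup := by
      rw [hent]
      exact PySem.Dict.nodup_keys_foldl_insert_key flt Prod.snd _ _ PySem.Dict.nodup_keys_empty
    have hkeymem : ∀ k ∈ ent.keys, 0 ≤ k ∧ k < (n : Int) := by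
      intro k hk
      rcases mem_keys_fold flt PySem.Dict.empty k hk with h' | ⟨p, hp, rfl⟩
      · simp [PySem.Dict.keys_empty] at h'
      · exact hc p (List.mem_of_mem_filter hp)
    set ks := PySem.List.sorted ent.keys (fun c => c) true with hks
    have hperm : ks.Perm ent.keys := PySem.List.sorted_perm ent.keys (fun c => c) true
    have hksmem : ∀ k, k ∈ ks ↔ k ∈ ent.keys := fun k => hperm.mem_iff
    have hkssort : ks.Pairwise (· > ·) := by
      have h1 : ks.Pairwise (fun a b => b ≤ a) :=
        PySem.List.sorted_pairwise_rev ent.keys (fun c => c)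
      have h2 : ks.Nodup := hperm.nodup_iff.mpr hkeysnodup
      exact (h1.and h2).imp (fun h => by
        rcases h with ⟨hle, hne⟩
        exact lt_of_le_of_ne hle (Ne.symm hne))
    -- both sides equal acc-free canonical string
    have hB := gather_runs bs ent g (fun c => rfl) ks (m + 1) [] hkssort
      (fun k hk => hkeymem k ((hksmem k).mp hk) |>.imp id (fun h => by omega))
      (by omega)
      (fun j hj hjn => by
        rw [PySem.Dict.get?_eq_none_iff_not_mem_keys]
        exact fun hmem => hjn ((hksmem _).mpr hmem))
      (fun k hk => by
        rw [← PySem.Dict.contains_eq_isSome_get?, PySem.Dict.contains_iff_mem_keys]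
        exact (hksmem k).mp hk)
    rw [hB]
    apply congrArg String.ofList
    simp only [List.nil_append]
    have hnn : (m + 1).toNat = n := rfl
    rw [hnn, List.map_reverse]
    apply congrArg List.reverse
    apply List.ext_getElem
    · rw [scatter_length]; simp
    · intro j hj1 hj2
      have hjn : j < n := by
        have := hj1; rwa [scatter_length, List.length_replicate] at this
      rw [scatter_get bs mm n hc (List.replicate n '0') (by simp) PySem.Dict.empty
        (by intro i hi; simp [PySem.Dict.get?_empty]) j hjn]
      simp only [List.getElem_map, List.getElem_range]
      rw [hAfold]
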